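-- pv_equiv track=rewrite | github.com/issdandavis/SCBE-AETHERMOORE | training/snake/dtn_router.py | _extract_assumptions
-- ===== SOURCE A (Python) =====
-- def _extract_assumptions(instruction: str, response: str) -> list[str]:
--     """Extract implicit assumptions that must be packed into the bundle.
--
--     In DTN, you can't ask clarifying questions — you must pack
--     ALL assumptions into the bundle payload upfront.
--     """
--     assumptions = []
--
--     # Language/format assumptions
--     if any(kw in instruction.lower() for kw in ["code", "implement", "function", "class"]):
--         assumptions.append("Assumes target language is Python unless specified")
--         assumptions.append("Assumes modern language version (3.11+)")
--     if any(kw in instruction.lower() for kw in ["explain", "describe", "what is"]):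
--         assumptions.append("Assumes technical audience with domain knowledge")
--     if any(kw in instruction.lower() for kw in ["security", "encrypt", "auth"]):
--         assumptions.append("Assumes production-grade security requirements")
--         assumptions.append("Assumes compliance with NIST/ISO standards")
--
--     # Domain assumptions
--     if any(kw in instruction.lower() for kw in ["api", "endpoint", "rest"]):
--         assumptions.append("Assumes RESTful conventions unless specified")
--     if any(kw in instruction.lower() for kw in ["database", "query", "table"]):
--         assumptions.append("Assumes relational database unless specified")
--
--     # Meta-assumptions (always present in DTN bundles)
--     assumptions.append("No clarifying questions possible — all context is in this bundle")
--     assumptions.append("Bundle must be self-sufficient for autonomous execution")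
--
--     return assumptions
-- ===== SOURCE B (Python) =====
-- # One pass over the lowered instruction: at each position try all keywords at
-- # once (like a multi-pattern matcher), record which groups fired, then emit
-- # the assumption blocks from the flags.  No per-group `in` tests.
--
-- _KEYWORDS = [
--     ("code", 0), ("implement", 0), ("function", 0), ("class", 0),
--     ("explain", 1), ("describe", 1), ("what is", 1),
--     ("security", 2), ("encrypt", 2), ("auth", 2),
--     ("api", 3), ("endpoint", 3), ("rest", 3),
--     ("database", 4), ("query", 4), ("table", 4),
-- ]
--
-- _BLOCKS = [
--     ["Assumes target language is Python unless specified",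
--      "Assumes modern language version (3.11+)"],
--     ["Assumes technical audience with domain knowledge"],
--     ["Assumes production-grade security requirements",
--      "Assumes compliance with NIST/ISO standards"],
--     ["Assumes RESTful conventions unless specified"],
--     ["Assumes relational database unless specified"],
-- ]
--
-- _META = [
--     "No clarifying questions possible — all context is in this bundle",
--     "Bundle must be self-sufficient for autonomous execution",
-- ]
--
--
-- def _extract_assumptions(instruction: str, response: str) -> list[str]:
--     low = instruction.lower()
--     hit = [False] * len(_BLOCKS)
--     for i in range(len(low)):
--         for kw, g in _KEYWORDS:
--             if low.startswith(kw, i):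
--                 hit[g] = True
--     out = []
--     for g in range(len(_BLOCKS)):
--         if hit[g]:
--             out.extend(_BLOCKS[g])
--     return out + _META
-- ===== Notes on version B (the rewrite author's own statement) =====
-- stated objective: alternative
-- what changed: Replaces the five per-group 'keyword in instruction' membership tests by a single left-to-right scan of the lowered instruction that tries every keyword at each position (multi-pattern matcher style) into group flags, then emits the assumption blocks from the flags.
import Mathlib
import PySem

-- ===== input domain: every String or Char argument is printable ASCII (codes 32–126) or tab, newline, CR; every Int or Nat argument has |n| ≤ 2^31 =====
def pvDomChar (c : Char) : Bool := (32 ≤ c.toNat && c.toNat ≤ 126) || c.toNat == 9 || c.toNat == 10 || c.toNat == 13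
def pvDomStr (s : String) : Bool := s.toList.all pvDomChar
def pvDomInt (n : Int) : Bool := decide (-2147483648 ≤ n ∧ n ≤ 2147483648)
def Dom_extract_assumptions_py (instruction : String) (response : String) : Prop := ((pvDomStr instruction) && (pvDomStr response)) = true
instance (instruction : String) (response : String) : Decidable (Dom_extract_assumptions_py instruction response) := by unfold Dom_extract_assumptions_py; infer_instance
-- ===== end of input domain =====

-- B replaces the per-group 'keyword in instruction' tests by one left-to-right scan of the lowered instruction matching all keywords at once into group flags (alternative algorithm, similar cost).


-- ===== PORT A =====  (response is unused by the Python too)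
def extract_assumptions_py (instruction : String) (_response : String) : List String :=
  let assumptions : List String := []
  let assumptions := if ["code", "implement", "function", "class"].any (fun kw => PySem.Str.isIn kw (PySem.Str.lower instruction)) then
      assumptions ++ ["Assumes target language is Python unless specified"] ++ ["Assumes modern language version (3.11+)"]
    else assumptions
  let assumptions := if ["explain", "describe", "what is"].any (fun kw => PySem.Str.isIn kw (PySem.Str.lower instruction)) then
      assumptions ++ ["Assumes technical audience with domain knowledge"]
    else assumptions
  let assumptions := if ["security", "encrypt", "auth"].any (fun kw => PySem.Str.isIn kw (PySem.Str.lower instruction)) then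
      assumptions ++ ["Assumes production-grade security requirements"] ++ ["Assumes compliance with NIST/ISO standards"]
    else assumptions
  let assumptions := if ["api", "endpoint", "rest"].any (fun kw => PySem.Str.isIn kw (PySem.Str.lower instruction)) then
      assumptions ++ ["Assumes RESTful conventions unless specified"]
    else assumptions
  let assumptions := if ["database", "query", "table"].any (fun kw => PySem.Str.isIn kw (PySem.Str.lower instruction)) then
      assumptions ++ ["Assumes relational database unless specified"]
    else assumptions
  let assumptions := assumptions ++ ["No clarifying questions possible — all context is in this bundle"]
  let assumptions := assumptions ++ ["Bundle must be self-sufficient for autonomous execution"]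
  assumptions

-- ===== PORT B =====  (Source B: _KEYWORDS / _BLOCKS / _META tables plus a single position scan)
def pvKeywords : List (List Char × Nat) :=
  [ ("code".toList, 0), ("implement".toList, 0), ("function".toList, 0), ("class".toList, 0),
    ("explain".toList, 1), ("describe".toList, 1), ("what is".toList, 1),
    ("security".toList, 2), ("encrypt".toList, 2), ("auth".toList, 2),
    ("api".toList, 3), ("endpoint".toList, 3), ("rest".toList, 3),
    ("database".toList, 4), ("query".toList, 4), ("table".toList, 4) ]

def pvBlocks : List (List String) :=
  [ ["Assumes target language is Python unless specified",
     "Assumes modern language version (3.11+)"],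
    ["Assumes technical audience with domain knowledge"],
    ["Assumes production-grade security requirements",
     "Assumes compliance with NIST/ISO standards"],
    ["Assumes RESTful conventions unless specified"],
    ["Assumes relational database unless specified"] ]

def pvMetaB : List String :=
  [ "No clarifying questions possible — all context is in this bundle",
    "Bundle must be self-sufficient for autonomous execution" ]

-- the position scan: hit = [False]*5; for i in range(len(low)): for kw,g in _KEYWORDS: if low.startswith(kw, i): hit[g] = True  (low.startswith(kw, i) = startswith of low.drop i)
def pvScan (low : List Char) : List Bool :=
  (List.range low.length).foldl
    (fun hit i =>
      pvKeywords.foldl (fun hit p => if PySem.Chars.startswith (low.drop i) p.1 then hit.set p.2 true else hit) hit)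
    (List.replicate pvBlocks.length false)

def extract_assumptions_py_alt (instruction : String) (_response : String) : List String :=
  let low := (PySem.Str.lower instruction).toList
  let hit := pvScan low
  let out := (List.range pvBlocks.length).foldl
    (fun out g => if hit.getD g false then out ++ pvBlocks.getD g [] else out) []
  out ++ pvMetaB

-- ===== PRECONDITION & SPEC =====
def Spec_extract_assumptions_py (instruction : String) (response : String) (out : List String) : Prop := out = extract_assumptions_py_alt instruction response
instance (instruction : String) (response : String) (out : List String) : Decidable (Spec_extract_assumptions_py instruction response out) := by unfold Spec_extract_assumptions_py; infer_instance

-- ===== CLAIM (what is proved, stated in full; the proofs are below) =====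
def Claim_equal_extract_assumptions_py : Prop := ∀ (instruction : String) (response : String), Dom_extract_assumptions_py instruction response → Spec_extract_assumptions_py instruction response (extract_assumptions_py instruction response)

-- ===== LEMMAS AND PROOFS =====

-- the inner keyword fold only sets flags; flag g of its result = old flag OR some keyword of group g fires
lemma pv_getD_foldl_set (l : List (List Char × Nat)) (hit : List Bool) (g : Nat)
    (hg : g < hit.length) (cond : List Char → Bool) :
    (l.foldl (fun h p => if cond p.1 then h.set p.2 true else h) hit).getD g false
      = (hit.getD g false || l.any (fun p => p.2 == g && cond p.1)) := by
  induction l generalizing hit with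
  | nil => simp
  | cons p l ih =>
    simp only [List.foldl_cons, List.any_cons]
    by_cases hc : cond p.1
    · rw [if_pos hc, ih _ (by simpa using hg)]
      by_cases hpg : p.2 = g
      · subst hpg
        simp [hc, List.getD_eq_getElem?_getD, List.getElem?_set_self (by omega)]
      · simp [hc, List.getD_eq_getElem?_getD, List.getElem?_set_ne (fun h => hpg h),
          beq_eq_false_iff_ne.mpr hpg]
    · rw [if_neg hc, ih _ hg]
      rw [Bool.not_eq_true] at hc
      simp [hc]

lemma pv_length_inner (hit : List Bool) (l : List (List Char × Nat)) (tail : List Char) :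
    (l.foldl (fun h p => if PySem.Chars.startswith tail p.1 then h.set p.2 true else h) hit).length
      = hit.length := by
  induction l generalizing hit with
  | nil => rfl
  | cons p l ih => simp only [List.foldl_cons]; split <;> simp [ih]

-- flag g after scanning all positions = some position fires some keyword of group g
lemma pv_getD_scanFold (low : List Char) (idxs : List Nat) (hit : List Bool) (g : Nat)
    (hg : g < hit.length) :
    (idxs.foldl (fun hit i =>
        pvKeywords.foldl (fun h p => if PySem.Chars.startswith (low.drop i) p.1 then h.set p.2 true else h) hit) hit).getD g false
      = (hit.getD g false ||
          idxs.any (fun i => pvKeywords.any (fun p => p.2 == g && PySem.Chars.startswith (low.drop i) p.1))) := by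
  induction idxs generalizing hit with
  | nil => simp
  | cons i is ih =>
    simp only [List.foldl_cons, List.any_cons]
    rw [ih _ (by rw [pv_length_inner]; exact hg), pv_getD_foldl_set _ _ _ hg, Bool.or_assoc]

lemma pv_any_swap {α β : Type} (xs : List α) (ys : List β) (f : α → β → Bool) :
    (xs.any fun x => ys.any fun y => f x y) = (ys.any fun y => xs.any fun x => f x y) := by
  rw [Bool.eq_iff_iff]
  simp only [List.any_eq_true]
  tauto

lemma pv_and_any {α : Type} (c : Bool) (xs : List α) (f : α → Bool) :
    (xs.any fun x => c && f x) = (c && xs.any f) := by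
  cases c <;> simp

lemma pv_any_congr {α : Type} (l : List α) (f g : α → Bool) (h : ∀ x ∈ l, f x = g x) :
    l.any f = l.any g := by
  induction l with
  | nil => rfl
  | cons x l ih =>
    simp only [List.any_cons, h x (List.mem_cons_self), ih fun y hy => h y (List.mem_cons_of_mem _ hy)]

-- a nonempty keyword is a substring iff it starts at some position BELOW the length
lemma pv_any_startswith_eq_isIn (low kw : List Char) (hk : kw ≠ []) :
    ((List.range low.length).any fun i => PySem.Chars.startswith (low.drop i) kw)
      = PySem.Chars.isIn kw low := by
  rcases h : PySem.Chars.isIn kw low with _ | _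
  · rw [PySem.Chars.isIn_eq_false_iff] at h
    simp only [List.any_eq_false, List.mem_range]
    intro i _
    rw [Bool.not_eq_true, ← Bool.not_eq_true] at *
    rw [PySem.Chars.startswith_iff]
    intro hp
    exact h (List.infix_iff_prefix_suffix.2 ⟨_, hp, List.drop_suffix i low⟩)
  · obtain ⟨j, hj⟩ := (PySem.Chars.exists_prefix_drop_iff_isIn (sub := kw) (s := low)).2 h
    have hjlt : j < low.length := by
      by_contra hge
      rw [List.drop_eq_nil_of_le (by omega)] at hj
      exact hk (List.prefix_nil.1 hj)
    simp only [List.any_eq_true, List.mem_range]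
    exact ⟨j, hjlt, (PySem.Chars.startswith_iff _ _).2 hj⟩

-- the scan flag of group g equals A's membership test over that group's keywords
lemma pv_scan_getD (low : List Char) (g : Nat) (hg : g < 5) :
    (pvScan low).getD g false
      = pvKeywords.any (fun p => p.2 == g && PySem.Chars.isIn p.1 low) := by
  unfold pvScan
  rw [pv_getD_scanFold _ _ _ _ (by simp only [List.length_replicate, pvBlocks, List.length_cons, List.length_nil]; omega)]
  have hrep : (List.replicate pvBlocks.length false).getD g false = false := by
    rcases Nat.lt_or_ge g pvBlocks.length with h | h
    · rw [List.getD_eq_getElem?_getD, List.getElem?_replicate, if_pos h]; rfl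
    · rw [List.getD_eq_getElem?_getD, List.getElem?_eq_none (by simpa using h)]; rfl
  rw [hrep, Bool.false_or]
  rw [pv_any_swap]
  refine pv_any_congr _ _ _ ?_
  intro p hp
  rw [pv_and_any]
  have hne : p.1 ≠ [] := by
    fin_cases hp <;> simp
  rw [pv_any_startswith_eq_isIn _ _ hne]

-- ===== VERDICT (by name: the statement is the Claim_ definition above) =====
theorem extract_assumptions_py_spec : Claim_equal_extract_assumptions_py := by
  intro instruction response _
  unfold Spec_extract_assumptions_py
  have hr5 : List.range pvBlocks.length = [0,1,2,3,4] := rfl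
  have hb0 : pvBlocks.getD 0 [] = ["Assumes target language is Python unless specified", "Assumes modern language version (3.11+)"] := rfl
  have hb1 : pvBlocks.getD 1 [] = ["Assumes technical audience with domain knowledge"] := rfl
  have hb2 : pvBlocks.getD 2 [] = ["Assumes production-grade security requirements", "Assumes compliance with NIST/ISO standards"] := rfl
  have hb3 : pvBlocks.getD 3 [] = ["Assumes RESTful conventions unless specified"] := rfl
  have hb4 : pvBlocks.getD 4 [] = ["Assumes relational database unless specified"] := rfl
  simp only [extract_assumptions_py, extract_assumptions_py_alt, hr5, hb0, hb1, hb2, hb3, hb4,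
    List.foldl_cons, List.foldl_nil,
    pv_scan_getD _ 0 (by omega), pv_scan_getD _ 1 (by omega), pv_scan_getD _ 2 (by omega),
    pv_scan_getD _ 3 (by omega), pv_scan_getD _ 4 (by omega),
    pvKeywords, List.any_cons, List.any_nil,
    PySem.Str.isIn_eq, PySem.Str.toList_lower,
    pvMetaB]
  norm_num
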